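-- pv_equiv track=rewrite | github.com/algoslearner/leetcode | companies/amazon/OA/16_grid_climbing.py | gridOfNodes
-- ===== SOURCE A (Python) =====
-- def gridOfNodes(intervals: list[list[int]]) -> int:
--     connections = 0
--     prevNodes = intervals[0].count(1)
--     for interval in intervals[1:]:
--         currNodeCount = interval.count(1)
--         if currNodeCount >= 1:
--             connections += currNodeCount * prevNodes
--             prevNodes = currNodeCount
--     return connections
-- ===== SOURCE B (Python) =====
-- def gridOfNodes(intervals: list[list[int]]) -> int:
--     counts = [row.count(1) for row in intervals]
--     total = 0
--     for i in range(len(counts)):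
--         if counts[i] > 0:
--             for d in counts[i + 1:]:
--                 if d > 0:
--                     total += counts[i] * d
--                     break
--     return total
-- ===== Notes on version B (the rewrite author's own statement) =====
-- stated objective: alternative
-- what changed: Replaces A's single running-prev accumulator scan by a two-stage nested-scan algorithm: build the per-row 1-counts once, then for each nonzero count scan forward to the next nonzero count and add their product.
-- outside the precondition, e.g. on gridOfNodes([]): A raises IndexError, B returns 0
import Mathlib
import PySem

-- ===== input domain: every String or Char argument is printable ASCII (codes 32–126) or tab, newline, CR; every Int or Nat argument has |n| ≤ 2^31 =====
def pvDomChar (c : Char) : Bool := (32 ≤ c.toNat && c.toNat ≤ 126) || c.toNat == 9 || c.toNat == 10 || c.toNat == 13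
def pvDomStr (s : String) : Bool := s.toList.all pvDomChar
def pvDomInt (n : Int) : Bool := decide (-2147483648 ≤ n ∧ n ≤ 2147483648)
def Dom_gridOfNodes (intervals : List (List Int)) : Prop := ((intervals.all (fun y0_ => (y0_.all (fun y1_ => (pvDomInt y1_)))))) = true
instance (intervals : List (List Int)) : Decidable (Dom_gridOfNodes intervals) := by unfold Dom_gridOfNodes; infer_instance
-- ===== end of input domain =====

-- B replaces A's running-prev accumulator scan by a two-stage nested-scan algorithm: build the
-- per-row 1-counts once, then for each nonzero count scan forward to the next nonzero count and
-- add their product (alternative decomposition; not claimed faster).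
-- Pre_ excludes only the empty list, on which A raises IndexError (B returns 0 there).


-- ===== PORT A =====
def gridOfNodes (intervals : List (List Int)) : Int :=
  match PySem.List.pyGet? intervals 0 with
  | none => 0   -- IndexError in Python; excluded by Pre_gridOfNodes
  | some first =>
    let init : Int × Int := (0, (PySem.List.count first 1 : Int))
    let r := (PySem.List.slice intervals (some 1) none).foldl
      (fun (s : Int × Int) interval =>
        let currNodeCount : Int := (PySem.List.count interval 1 : Int)
        if 1 ≤ currNodeCount then (s.1 + currNodeCount * s.2, currNodeCount) else s)
      init
    r.1

-- ===== PORT B =====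
-- inner loop: 'for d in counts[i+1:]: if d > 0: total += c*d; break'
def pvInner (c : Int) : List Int → Int
  | [] => 0
  | d :: rest => if 0 < d then c * d else pvInner c rest

-- outer loop over the indices of counts; at index i the slice counts[i+1:] is the tail,
-- so the index loop is transcribed as structural recursion carrying the tail
def pvOuter : List Int → Int
  | [] => 0
  | c :: rest => (if 0 < c then pvInner c rest else 0) + pvOuter rest

def gridOfNodes_alt (intervals : List (List Int)) : Int :=
  pvOuter (intervals.map (fun row => (PySem.List.count row 1 : Int)))

-- ===== PRECONDITION & SPEC =====
def Pre_gridOfNodes (intervals : List (List Int)) : Prop := intervals ≠ []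
instance (intervals : List (List Int)) : Decidable (Pre_gridOfNodes intervals) := by unfold Pre_gridOfNodes; infer_instance
def pvWitness_gridOfNodes : List (List Int) := [[1, 0, 1], [0], [1]]

def Spec_gridOfNodes (intervals : List (List Int)) (out : Int) : Prop := out = gridOfNodes_alt intervals
instance (intervals : List (List Int)) (out : Int) : Decidable (Spec_gridOfNodes intervals out) := by unfold Spec_gridOfNodes; infer_instance

-- ===== CLAIM (what is proved, stated in full; the proofs are below) =====
def Claim_equal_gridOfNodes : Prop := ∀ (intervals : List (List Int)), Dom_gridOfNodes intervals → Pre_gridOfNodes intervals → Spec_gridOfNodes intervals (gridOfNodes intervals)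

-- ===== LEMMAS AND PROOFS =====

-- sum of products of adjacent elements
def pvAdjSum (l : List Int) : Int :=
  ((l.zip l.tail).map (fun p => p.1 * p.2)).sum

theorem pvAdjSum_cons_cons (a b : Int) (r : List Int) :
    pvAdjSum (a :: b :: r) = a * b + pvAdjSum (b :: r) := by
  simp [pvAdjSum, List.zip]

-- A's loop over a list of counts equals conn plus the adjacent-product sum of the
-- positive counts with prev prepended (prev = 0 contributes nothing).
theorem pvLoop (cs : List Int) (conn prev : Int) (hcs : ∀ c ∈ cs, 0 ≤ c) (hp : 0 ≤ prev) :
    (cs.foldl (fun (s : Int × Int) c => if 1 ≤ c then (s.1 + c * s.2, c) else s) (conn, prev)).1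
      = conn + pvAdjSum ((prev :: cs).filter (fun c => 0 < c)) := by
  induction cs generalizing conn prev with
  | nil =>
      by_cases h : 0 < prev <;> simp [List.foldl, List.filter, h, pvAdjSum]
  | cons c cs ih =>
      have hc : 0 ≤ c := hcs c (by simp)
      have hrest : ∀ x ∈ cs, 0 ≤ x := fun x hx => hcs x (by simp [hx])
      rcases lt_or_eq_of_le hc with hpos | hzero
      · have h1 : (1 : Int) ≤ c := hpos
        by_cases hpp : 0 < prev
        · simp only [List.foldl, if_pos h1]
          rw [ih _ _ hrest (le_of_lt hpos)]
          have e1 : (prev :: c :: cs).filter (fun c => 0 < c)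
              = prev :: c :: cs.filter (fun c => 0 < c) := by
            simp [List.filter, hpp, hpos]
          rw [e1]
          have e2 : (c :: cs).filter (fun c => 0 < c) = c :: cs.filter (fun c => 0 < c) := by
            simp [List.filter, hpos]
          rw [e2, pvAdjSum_cons_cons]
          ring
        · have hp0 : prev = 0 := le_antisymm (not_lt.mp hpp) hp
          subst hp0
          simp only [List.foldl, if_pos h1]
          rw [ih _ _ hrest (le_of_lt hpos)]
          have e1 : ((0 : Int) :: c :: cs).filter (fun c => 0 < c)
              = (c :: cs).filter (fun c => 0 < c) := by
            simp [List.filter]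
          rw [e1]
          ring_nf
      · have h0 : c = 0 := hzero.symm ▸ rfl
        subst h0
        simp only [List.foldl, if_neg (by norm_num : ¬ (1 : Int) ≤ 0)]
        rw [ih _ _ hrest hp]
        have e1 : (prev :: (0 : Int) :: cs).filter (fun c => 0 < c)
            = (prev :: cs).filter (fun c => 0 < c) := by
          simp [List.filter]
        rw [e1]

-- B's inner scan finds c times the first positive element of rest (0 if none)
theorem pvInner_eq (c : Int) (rest : List Int) :
    pvInner c rest = (match rest.filter (fun d => 0 < d) with
                      | [] => 0
                      | d :: _ => c * d) := by
  induction rest with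
  | nil => rfl
  | cons d r ih =>
      by_cases h : 0 < d <;> simp [pvInner, List.filter, h, ih]

-- B's nested scan equals the adjacent-product sum of the positive counts
theorem pvOuter_eq (cs : List Int) (hcs : ∀ c ∈ cs, 0 ≤ c) :
    pvOuter cs = pvAdjSum (cs.filter (fun c => 0 < c)) := by
  induction cs with
  | nil => rfl
  | cons c rest ih =>
      have hrest : ∀ x ∈ rest, 0 ≤ x := fun x hx => hcs x (by simp [hx])
      by_cases h : 0 < c
      · simp only [pvOuter, if_pos h, ih hrest, pvInner_eq]
        have e1 : (c :: rest).filter (fun c => 0 < c) = c :: rest.filter (fun c => 0 < c) := by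
          simp [List.filter, h]
        rw [e1]
        cases hf : rest.filter (fun d => 0 < d) with
        | nil => simp [pvAdjSum]
        | cons d r => rw [pvAdjSum_cons_cons]
      · have e1 : (c :: rest).filter (fun c => 0 < c) = rest.filter (fun c => 0 < c) := by
          simp [List.filter, h]
        simp only [pvOuter, if_neg h, ih hrest, e1, zero_add]

theorem gridOfNodes_spec : Claim_equal_gridOfNodes := by
  intro intervals _ hpre
  unfold Spec_gridOfNodes
  cases intervals with
  | nil => exact absurd rfl hpre
  | cons first rest =>
      unfold gridOfNodes gridOfNodes_alt
      simp only [PySem.List.slice_from_one, List.tail_cons]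
      have hget : PySem.List.pyGet? (first :: rest) 0 = some first := by
        simp [PySem.List.pyGet?, PySem.List.pyIdx?]
      rw [hget]
      dsimp only
      rw [← List.foldl_map
        (f := fun interval => (PySem.List.count interval 1 : Int))
        (g := fun (s : Int × Int) c => if 1 ≤ c then (s.1 + c * s.2, c) else s) (l := rest)
        (init := ((0 : Int), (PySem.List.count first 1 : Int)))]
      rw [pvLoop (rest.map (fun interval => (PySem.List.count interval 1 : Int)))
        0 (PySem.List.count first 1)
        (by intro c hc; simp only [List.mem_map] at hc; obtain ⟨iv, _, rfl⟩ := hc; positivity)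
        (by positivity)]
      rw [List.map_cons, pvOuter_eq]
      · ring_nf
      · intro c hc
        simp only [List.mem_cons, List.mem_map] at hc
        rcases hc with rfl | ⟨iv, _, rfl⟩ <;> positivity
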